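-- pv_equiv track=rewrite | github.com/vedikajain2004/bharat_law_pipeline | ner/ner_engine.py | _gazetteer_entities
-- ===== SOURCE A (Python) =====
-- from typing import NamedTuple
--
-- class Entity(NamedTuple):
--     label: str
--     text:  str
--     start: int
--     end:   int
--
-- def _gazetteer_entities(text: str, gazetteer: list[str], label: str) -> list[Entity]:
--     """
--     Exact-match gazetteer lookup with word-boundary enforcement.
--     Gazetteer must be pre-sorted longest-first.
--     """
--     entities: list[Entity] = []
--     for phrase in gazetteer:
--         start = 0
--         while True:
--             idx = text.find(phrase, start)
--             if idx == -1:
--                 break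
--             end = idx + len(phrase)
--             pre  = text[idx - 1]  if idx > 0   else " "
--             post = text[end]       if end < len(text) else " "
--             # Word boundary: surrounding chars must not be word characters
--             if not pre.isalpha() and not post.isalpha():
--                 entities.append(Entity(label, phrase, idx, end))
--             start = idx + 1
--     return entities
-- ===== SOURCE B (Python) =====
-- def _gazetteer_entities(text, gazetteer, label):
--     """Position-major scan: walk the text once; at each word-boundary start
--     position try every gazetteer phrase, then group the hits back into
--     gazetteer order."""
--     n = len(text)
--     matches = []  # (gazetteer index, entity tuple), in text order
--     for i in range(n + 1):
--         if i > 0 and text[i - 1].isalpha():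
--             continue  # not a word-boundary start position
--         for j, phrase in enumerate(gazetteer):
--             end = i + len(phrase)
--             if text[i:end] == phrase and (end >= n or not text[end].isalpha()):
--                 matches.append((j, (label, phrase, i, end)))
--     return [e for j in range(len(gazetteer)) for k, e in matches if k == j]
-- ===== Notes on version B (the rewrite author's own statement) =====
-- stated objective: alternative
-- what changed: A scans phrase-by-phrase, repeatedly calling text.find to jump between occurrences; B makes a single position-major pass over the text, testing every gazetteer phrase only at word-boundary start positions, then regroups the collected hits back into gazetteer order.
import Mathlib
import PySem

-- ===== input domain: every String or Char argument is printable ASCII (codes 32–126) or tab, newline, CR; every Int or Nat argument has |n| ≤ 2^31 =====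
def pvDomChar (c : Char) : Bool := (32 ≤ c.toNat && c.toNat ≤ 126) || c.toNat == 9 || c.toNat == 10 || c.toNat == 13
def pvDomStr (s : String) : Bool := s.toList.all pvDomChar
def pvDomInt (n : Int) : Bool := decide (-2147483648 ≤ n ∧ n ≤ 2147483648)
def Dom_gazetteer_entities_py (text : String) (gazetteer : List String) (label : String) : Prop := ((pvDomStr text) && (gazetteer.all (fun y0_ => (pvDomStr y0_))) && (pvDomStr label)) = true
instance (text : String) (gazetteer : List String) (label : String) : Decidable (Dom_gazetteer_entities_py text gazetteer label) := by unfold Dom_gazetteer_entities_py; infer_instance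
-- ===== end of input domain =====

-- B replaces A's phrase-major repeated text.find scans by a single position-major
-- scan of the text that buckets hits by gazetteer index (objective: alternative).

-- ===== PORT A =====
-- facts about text.find(phrase, start) the while-loop's termination argument cites
theorem pv_findFrom_oob (cs p : List Char) (s : Nat) (hs : cs.length < s) :
    PySem.Chars.findFrom cs p (s : Int) none = -1 := by
  simp [PySem.Chars.findFrom]; omega

theorem pv_findFrom_bounds (cs p : List Char) (s : Nat)
    (h : PySem.Chars.findFrom cs p (s : Int) none ≠ -1) :
    s ≤ cs.length ∧ (s : Int) ≤ PySem.Chars.findFrom cs p (s : Int) none ∧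
      PySem.Chars.findFrom cs p (s : Int) none ≤ cs.length := by
  by_cases hle : s ≤ cs.length
  · refine ⟨hle, (PySem.Chars.findFrom_natCast_spec cs p s hle h).1, ?_⟩
    rw [PySem.Chars.findFrom_natCast cs p s hle] at h ⊢
    split at h
    · exact absurd rfl h
    · next hne =>
      rw [if_neg hne]
      have := PySem.Chars.find_le_length (cs.drop s) p
      simp only [List.length_drop] at this
      omega
  · exact absurd (pv_findFrom_oob cs p s (by omega)) h

-- the 'while True' loop of A, for one phrase: find next occurrence from 'start',
-- append if both neighbours are non-alphabetic, resume at idx+1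
def pvLoopA (cs p : List Char) (lab ph : String)
    (acc : List (String × String × Int × Int)) (start : Nat) :
    List (String × String × Int × Int) :=
  let idx := PySem.Chars.findFrom cs p (start : Int) none
  if h : idx = -1 then acc
  else
    let endp : Int := idx + (p.length : Int)
    let pre : Char := if 0 < idx then PySem.List.pyGetD cs (idx - 1) ' ' else ' '
    let post : Char := if endp < (cs.length : Int) then PySem.List.pyGetD cs endp ' ' else ' '
    let acc' := if !PySem.Chars.isalpha pre && !PySem.Chars.isalpha post then
        acc ++ [(lab, ph, idx, endp)] else acc
    pvLoopA cs p lab ph acc' (idx.toNat + 1)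
termination_by cs.length + 1 - start
decreasing_by
  have hb := pv_findFrom_bounds cs p start h
  omega

def gazetteer_entities_py (text : String) (gazetteer : List String) (label : String) :
    List (String × String × Int × Int) :=
  gazetteer.foldl (fun entities phrase => pvLoopA text.toList phrase.toList label phrase entities 0) []

-- ===== PORT B =====
def gazetteer_entities_py_alt (text : String) (gazetteer : List String) (label : String) :
    List (String × String × Int × Int) :=
  let cs := text.toList
  let n : Int := cs.length
  -- single pass over start positions; every phrase tried at each boundary position
  let hits : List (Int × (String × String × Int × Int)) :=
    (PySem.List.pyRange 0 (n + 1) 1).foldl (fun ms i =>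
      if decide (0 < i) && PySem.Chars.isalpha (PySem.List.pyGetD cs (i - 1) ' ') then ms
      else
        (PySem.List.enumerate gazetteer).foldl (fun ms2 jp =>
          let endp : Int := i + (jp.2.toList.length : Int)
          if (PySem.List.slice cs (some i) (some endp) == jp.2.toList)
              && (decide (n ≤ endp) || !PySem.Chars.isalpha (PySem.List.pyGetD cs endp ' ')) then
            ms2 ++ [(jp.1, (label, jp.2, i, endp))]
          else ms2) ms) []
  -- regroup the position-ordered hits into gazetteer order
  (PySem.List.pyRange 0 (gazetteer.length : Int) 1).flatMap (fun j =>
    (hits.filter (fun m => m.1 == j)).map (fun m => m.2))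

-- ===== PRECONDITION & SPEC =====
def Spec_gazetteer_entities_py (text : String) (gazetteer : List String) (label : String) (out : List (String × String × Int × Int)) : Prop := out = gazetteer_entities_py_alt text gazetteer label
instance (text : String) (gazetteer : List String) (label : String) (out : List (String × String × Int × Int)) : Decidable (Spec_gazetteer_entities_py text gazetteer label out) := by unfold Spec_gazetteer_entities_py; infer_instance

-- ===== CLAIM (what is proved, stated in full; the proofs are below) =====
def Claim_equal_gazetteer_entities_py : Prop := ∀ (text : String) (gazetteer : List String) (label : String), Dom_gazetteer_entities_py text gazetteer label → Spec_gazetteer_entities_py text gazetteer label (gazetteer_entities_py text gazetteer label)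

-- ===== LEMMAS AND PROOFS =====

-- canonical description of the hits of one phrase: boundary-checked occurrences in text order
def pvPre (cs : List Char) (i : Nat) : Bool :=
  !PySem.Chars.isalpha (if 0 < i then cs.getD (i - 1) ' ' else ' ')

def pvPost (cs p : List Char) (i : Nat) : Bool :=
  !PySem.Chars.isalpha (if i + p.length < cs.length then cs.getD (i + p.length) ' ' else ' ')

def pvCond (cs p : List Char) (i : Nat) : Bool :=
  decide (p <+: cs.drop i) && pvPre cs i && pvPost cs p i

def pvEnt (p : List Char) (lab ph : String) (i : Nat) : String × String × Int × Int :=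
  (lab, ph, (i : Int), (i : Int) + (p.length : Int))

def pvHitsFrom (cs p : List Char) (lab ph : String) (s : Nat) :
    List (String × String × Int × Int) :=
  ((List.range' s (cs.length + 1 - s)).filter (pvCond cs p)).map (pvEnt p lab ph)

theorem pvLoopA_eq (cs p : List Char) (lab ph : String) (acc : List (String × String × Int × Int))
    (s : Nat) : pvLoopA cs p lab ph acc s = acc ++ pvHitsFrom cs p lab ph s := by
  suffices H : ∀ m s acc, cs.length + 1 - s = m →
      pvLoopA cs p lab ph acc s = acc ++ pvHitsFrom cs p lab ph s from H _ s acc rfl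
  intro m
  induction m using Nat.strong_induction_on with
  | _ m ih =>
    intro s acc hm
    rw [pvLoopA]
    by_cases h : PySem.Chars.findFrom cs p (s : Int) none = -1
    · rw [dif_pos h]
      suffices hnil : pvHitsFrom cs p lab ph s = [] by rw [hnil, List.append_nil]
      unfold pvHitsFrom
      by_cases hs : s ≤ cs.length
      · have hno : ¬ p <:+: cs.drop s :=
          (PySem.Chars.findFrom_natCast_eq_neg_one_iff cs p s hs).mp h
        have hf : (List.range' s (cs.length + 1 - s)).filter (pvCond cs p) = [] := by
          rw [List.filter_eq_nil_iff]
          intro i hi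
          have his : s ≤ i := (List.mem_range'_1.mp hi).1
          simp only [pvCond, Bool.and_eq_true, decide_eq_true_eq, not_and]
          intro hpre
          exact absurd ((hpre.1.isInfix).trans
            (by rw [show cs.drop i = (cs.drop s).drop (i - s) by
                      rw [List.drop_drop]; congr 1; omega]
                exact (List.drop_suffix _ _).isInfix)) hno
        rw [hf]; rfl
      · rw [show cs.length + 1 - s = 0 by omega]; rfl
    · rw [dif_neg h]
      obtain ⟨hsle, hs_le_idx, hidx_le⟩ := pv_findFrom_bounds cs p s h
      obtain ⟨-, hocc, hmin⟩ := PySem.Chars.findFrom_natCast_spec cs p s hsle h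
      set idx := PySem.Chars.findFrom cs p (s : Int) none with hidxdef
      set iN := idx.toNat with hiN
      have hidxN : idx = (iN : Int) := by omega
      have hiNlen : iN ≤ cs.length := by omega
      have hsiN : s ≤ iN := by omega
      rw [ih (cs.length + 1 - (iN + 1)) (by omega) (iN + 1) _ rfl]
      have h4 : pvCond cs p iN = (pvPre cs iN && pvPost cs p iN) := by
        simp [pvCond, hocc]
      have hsplit : pvHitsFrom cs p lab ph s =
          (if pvCond cs p iN then [pvEnt p lab ph iN] else []) ++ pvHitsFrom cs p lab ph (iN + 1) := by
        unfold pvHitsFrom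
        rw [show cs.length + 1 - s = (iN - s) + ((cs.length - iN) + 1) by omega,
            ← List.range'_append_1, show s + (iN - s) = iN by omega, List.range'_succ]
        have h3 : (List.range' s (iN - s)).filter (pvCond cs p) = [] := by
          rw [List.filter_eq_nil_iff]
          intro i hi
          have hir := List.mem_range'_1.mp hi
          simp only [pvCond, Bool.and_eq_true, decide_eq_true_eq, not_and]
          intro hpre
          exact absurd hpre.1 (hmin i (by omega) (by omega))
        rw [List.filter_append, h3, List.nil_append, List.filter_cons,
            show cs.length - iN = cs.length + 1 - (iN + 1) by omega]
        by_cases hbc : pvCond cs p iN = true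
        · simp [hbc]
        · simp [hbc]
      rw [hsplit]
      have hpre_eq : (if 0 < idx then PySem.List.pyGetD cs (idx - 1) ' ' else ' ') =
          (if 0 < iN then cs.getD (iN - 1) ' ' else ' ') := by
        by_cases hz : 0 < iN
        · rw [if_pos (by omega), if_pos hz,
              show idx - 1 = ((iN - 1 : Nat) : Int) by omega, PySem.List.pyGetD_natCast]
        · rw [if_neg (by omega), if_neg hz]
      have hpost_eq : (if idx + (p.length : Int) < (cs.length : Int) then
            PySem.List.pyGetD cs (idx + (p.length : Int)) ' ' else ' ') =
          (if iN + p.length < cs.length then cs.getD (iN + p.length) ' ' else ' ') := by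
        by_cases hz : iN + p.length < cs.length
        · rw [if_pos (by omega), if_pos hz,
              show idx + (p.length : Int) = ((iN + p.length : Nat) : Int) by omega,
              PySem.List.pyGetD_natCast]
        · rw [if_neg (by omega), if_neg hz]
      have hcond : (!PySem.Chars.isalpha (if 0 < idx then PySem.List.pyGetD cs (idx - 1) ' ' else ' ') &&
          !PySem.Chars.isalpha (if idx + (p.length : Int) < (cs.length : Int) then
            PySem.List.pyGetD cs (idx + (p.length : Int)) ' ' else ' ')) = pvCond cs p iN := by
        rw [hpre_eq, hpost_eq, h4]; rfl
      rw [hcond]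
      by_cases hb : pvCond cs p iN = true
      · rw [if_pos hb, if_pos hb]
        simp [pvEnt, hidxN]
      · rw [if_neg hb, if_neg hb]
        simp

theorem pvA_eq_flatMap (text : String) (gazetteer : List String) (label : String) :
    gazetteer_entities_py text gazetteer label =
      gazetteer.flatMap (fun ph => pvHitsFrom text.toList ph.toList label ph 0) := by
  unfold gazetteer_entities_py
  have : (fun (entities : List (String × String × Int × Int)) (phrase : String) =>
      pvLoopA text.toList phrase.toList label phrase entities 0) =
      (fun entities phrase => entities ++ pvHitsFrom text.toList phrase.toList label phrase 0) := by
    funext entities phrase; exact pvLoopA_eq _ _ _ _ _ _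
  rw [this, PySem.List.foldl_append_eq_flatMap, List.nil_append]

-- B-side proof helpers: named copies of the three anonymous functions of port B
def pvSkipB (cs : List Char) (i : Int) : Bool :=
  decide (0 < i) && PySem.Chars.isalpha (PySem.List.pyGetD cs (i - 1) ' ')

def pvCB (cs : List Char) (n i : Int) (jp : Int × String) : Bool :=
  (PySem.List.slice cs (some i) (some (i + (jp.2.toList.length : Int))) == jp.2.toList)
    && (decide (n ≤ i + (jp.2.toList.length : Int))
        || !PySem.Chars.isalpha (PySem.List.pyGetD cs (i + (jp.2.toList.length : Int)) ' '))

def pvFB (label : String) (i : Int) (jp : Int × String) : Int × (String × String × Int × Int) :=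
  (jp.1, (label, jp.2, i, i + (jp.2.toList.length : Int)))

def pvHB (cs : List Char) (gaz : List String) (label : String) (i : Int) :
    List (Int × (String × String × Int × Int)) :=
  if pvSkipB cs i then []
  else ((PySem.List.enumerate gaz).filter (pvCB cs (cs.length : Int) i)).map (pvFB label i)

theorem pv_map_getD_range (g : List String) :
    (List.range g.length).map (fun j => g.getD j "") = g := by
  apply List.ext_getElem
  · simp
  · intro k h1 h2
    simp [List.getD_eq_getElem?_getD, List.getElem?_eq_getElem h2]

theorem pv_flatMap_if {α β : Type} (l : List α) (c : α → Bool) (f : α → β) :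
    l.flatMap (fun i => if c i then [f i] else []) = (l.filter c).map f := by
  induction l with
  | nil => rfl
  | cons x t ih => by_cases h : c x <;> simp [h, ih]

theorem pv_enum_filter_lt {α : Type} (g : List α) : ∀ (s j : Int), j < s →
    (PySem.List.enumerate g s).filter (fun jp => jp.1 == j) = [] := by
  induction g with
  | nil => intro s j _; rfl
  | cons x t ih =>
    intro s j hj
    rw [PySem.List.enumerate_cons, List.filter_cons]
    have hne : ((s, x).1 == j) = false := by simp; omega
    rw [hne, if_neg (by simp)]
    exact ih (s + 1) j (by omega)

theorem pv_enum_filter_eq {α : Type} (d : α) (g : List α) : ∀ (s : Int) (j : Nat), j < g.length →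
    (PySem.List.enumerate g s).filter (fun jp => jp.1 == s + (j : Int)) =
      [(s + (j : Int), g.getD j d)] := by
  induction g with
  | nil => intro s j h; simp at h
  | cons x t ih =>
    intro s j hj
    rw [PySem.List.enumerate_cons, List.filter_cons]
    cases j with
    | zero =>
      rw [if_pos (by simp)]
      rw [show (fun (jp : Int × α) => jp.1 == s + ((0 : Nat) : Int)) =
            (fun jp => jp.1 == s) by funext jp; simp]
      rw [pv_enum_filter_lt t (s + 1) s (by omega)]
      simp
    | succ k =>
      rw [if_neg (by simp; omega)]
      rw [show (fun (jp : Int × α) => jp.1 == s + ((k + 1 : Nat) : Int)) =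
            (fun jp => jp.1 == (s + 1) + (k : Int)) by funext jp; push_cast; ring_nf]
      rw [ih (s + 1) k (by simpa using hj)]
      rw [show s + 1 + (k : Int) = s + ((k + 1 : Nat) : Int) by push_cast; ring,
          List.getD_cons_succ]

theorem pvSkip_not_pre (cs : List Char) (i : Nat) : pvSkipB cs (i : Int) = !pvPre cs i := by
  unfold pvSkipB pvPre
  by_cases h : 0 < i
  · rw [if_pos h, show ((i : Int) - 1) = ((i - 1 : Nat) : Int) by omega,
        PySem.List.pyGetD_natCast]
    simp [h]
  · have h0 : i = 0 := by omega
    subst h0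
    have hsp : PySem.Chars.isalpha ' ' = false := by decide
    simp [hsp]

theorem pvCB_eq (cs : List Char) (ph : String) (j : Int) (i : Nat) :
    pvCB cs (cs.length : Int) (i : Int) (j, ph) =
      (decide (ph.toList <+: cs.drop i) && pvPost cs ph.toList i) := by
  unfold pvCB pvPost
  rw [show ((i : Int) + (ph.toList.length : Int)) = (((i + ph.toList.length : Nat)) : Int) by
        push_cast; ring]
  rw [show (some (((i + ph.toList.length : Nat)) : Int)) =
        (some ((i : Int) + (ph.toList.length : Int))) by push_cast; ring_nf]
  rw [PySem.List.slice_natCast_add, PySem.List.pyGetD_natCast]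
  have hocc : (List.take ph.toList.length (List.drop i cs) == ph.toList) =
      decide (ph.toList <+: cs.drop i) := by
    rw [Bool.eq_iff_iff, beq_iff_eq, decide_eq_true_eq]
    exact ⟨fun h => List.prefix_iff_eq_take.mpr h.symm, fun h => (List.prefix_iff_eq_take.mp h).symm⟩
  rw [hocc]
  by_cases hlt : i + ph.toList.length < cs.length
  · rw [if_pos hlt]
    have h1 : decide ((cs.length : Int) ≤ ((i + ph.toList.length : Nat) : Int)) = false := by
      rw [decide_eq_false_iff_not]; push_cast; omega
    rw [h1]
    simp
  · rw [if_neg hlt]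
    have h1 : decide ((cs.length : Int) ≤ ((i + ph.toList.length : Nat) : Int)) = true := by
      rw [decide_eq_true_eq]; push_cast; omega
    rw [h1]
    have hsp : PySem.Chars.isalpha ' ' = false := by decide
    simp [hsp]

theorem pvHB_group (cs : List Char) (gaz : List String) (label : String) (j : Nat)
    (hj : j < gaz.length) (i : Nat) :
    ((pvHB cs gaz label (i : Int)).filter (fun m => m.1 == (j : Int))).map (fun m => m.2) =
      if pvCond cs (gaz.getD j "").toList i then
        [pvEnt (gaz.getD j "").toList label (gaz.getD j "") i] else [] := by
  unfold pvHB
  by_cases hski : pvSkipB cs (i : Int)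
  · rw [if_pos hski, if_neg]
    · rfl
    · rw [pvSkip_not_pre] at hski
      simp only [pvCond, Bool.and_eq_true]
      rintro ⟨⟨-, hpre⟩, -⟩
      rw [hpre] at hski
      simp at hski
  · rw [if_neg hski, List.filter_map,
        show ((fun (m : Int × (String × String × Int × Int)) => m.1 == (j : Int)) ∘
              pvFB label (i : Int)) = (fun jp => jp.1 == (j : Int)) from rfl,
        List.filter_comm,
        show (fun (jp : Int × String) => jp.1 == (j : Int)) =
          (fun jp => jp.1 == (0 : Int) + (j : Int)) by funext jp; simp,
        pv_enum_filter_eq "" gaz 0 j hj, List.filter_singleton]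
    rw [pvSkip_not_pre] at hski
    have hpre : pvPre cs i = true := by
      cases hp : pvPre cs i
      · rw [hp] at hski; simp at hski
      · rfl
    rw [show ((0 : Int) + (j : Int), gaz.getD j "") = ((j : Int), gaz.getD j "") by simp]
    rw [pvCB_eq]
    have hcnd : (decide ((gaz.getD j "").toList <+: cs.drop i) && pvPost cs (gaz.getD j "").toList i)
        = pvCond cs (gaz.getD j "").toList i := by
      unfold pvCond
      rw [hpre]
      cases decide ((gaz.getD j "").toList <+: cs.drop i) <;>
        cases pvPost cs (gaz.getD j "").toList i <;> rfl
    rw [hcnd]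
    cases hc : pvCond cs (gaz.getD j "").toList i
    · rfl
    · simp [pvFB, pvEnt]

theorem pvB_eq_flatMap (text : String) (gazetteer : List String) (label : String) :
    gazetteer_entities_py_alt text gazetteer label =
      gazetteer.flatMap (fun ph => pvHitsFrom text.toList ph.toList label ph 0) := by
  unfold gazetteer_entities_py_alt
  dsimp only
  set cs := text.toList with hcs
  have hstep : (fun (ms : List (Int × (String × String × Int × Int))) (i : Int) =>
      if decide (0 < i) && PySem.Chars.isalpha (PySem.List.pyGetD cs (i - 1) ' ') then ms
      else
        (PySem.List.enumerate gazetteer).foldl (fun ms2 jp =>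
          if (PySem.List.slice cs (some i) (some (i + (jp.2.toList.length : Int))) == jp.2.toList)
              && (decide ((cs.length : Int) ≤ i + (jp.2.toList.length : Int))
                  || !PySem.Chars.isalpha (PySem.List.pyGetD cs (i + (jp.2.toList.length : Int)) ' ')) then
            ms2 ++ [(jp.1, (label, jp.2, i, i + (jp.2.toList.length : Int)))]
          else ms2) ms) =
      (fun ms i => ms ++ pvHB cs gazetteer label i) := by
    funext ms i
    by_cases hski : pvSkipB cs i
    · rw [if_pos (by simpa [pvSkipB] using hski)]
      unfold pvHB
      rw [if_pos hski, List.append_nil]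
    · rw [if_neg (by simpa [pvSkipB] using hski)]
      unfold pvHB
      rw [if_neg hski]
      exact PySem.List.foldl_append_if (pvCB cs (cs.length : Int) i) (pvFB label i)
        (PySem.List.enumerate gazetteer) ms
  rw [hstep, PySem.List.foldl_append_eq_flatMap, List.nil_append]
  rw [show ((cs.length : Int) + 1) = ((cs.length + 1 : Nat) : Int) by push_cast; ring,
      PySem.List.pyRange_zero_nat, PySem.List.pyRange_zero_nat, List.flatMap_map,
      List.flatMap_map]
  conv_rhs => rw [← pv_map_getD_range gazetteer]
  rw [List.flatMap_map]
  apply List.flatMap_congr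
  intro j hjm
  have hj : j < gazetteer.length := List.mem_range.mp hjm
  rw [List.filter_flatMap, List.map_flatMap]
  rw [List.flatMap_congr (fun i _ => pvHB_group cs gazetteer label j hj i)]
  rw [pv_flatMap_if]
  unfold pvHitsFrom
  rw [← List.range_eq_range', Nat.sub_zero]

-- ===== VERDICT (by name: the statement is the Claim_ definition above) =====
theorem gazetteer_entities_py_spec : Claim_equal_gazetteer_entities_py := by
  intro text gazetteer label _
  unfold Spec_gazetteer_entities_py
  rw [pvA_eq_flatMap, pvB_eq_flatMap]
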